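-- pv_equiv track=rewrite | github.com/marataya/python_algos | recursion/sort_even_before_odd.py | even_before_odd
-- ===== SOURCE A (Python) =====
-- def even_before_odd(list:list[int]) -> list[int]:
--     n = len(list)
--     if n <= 1:
--         return list
--     if list[0] % 2 == 0:
--         return [list[0]] + even_before_odd(list[1:])
--     else:
--         return even_before_odd(list[1:]) + [list[0]]
-- ===== SOURCE B (Python) =====
-- def even_before_odd(list: list[int]) -> list[int]:
--     evens, odds = [], []
--     for x in list:
--         (evens if x % 2 == 0 else odds).append(x)
--     return evens + odds[::-1]
-- ===== Notes on version B (the rewrite author's own statement) =====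
-- stated objective: faster
-- what changed: Replaced A's recursive head-split with quadratic list concatenations by a single forward pass collecting evens and odds into two lists, returning evens + reversed odds.
import Mathlib
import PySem

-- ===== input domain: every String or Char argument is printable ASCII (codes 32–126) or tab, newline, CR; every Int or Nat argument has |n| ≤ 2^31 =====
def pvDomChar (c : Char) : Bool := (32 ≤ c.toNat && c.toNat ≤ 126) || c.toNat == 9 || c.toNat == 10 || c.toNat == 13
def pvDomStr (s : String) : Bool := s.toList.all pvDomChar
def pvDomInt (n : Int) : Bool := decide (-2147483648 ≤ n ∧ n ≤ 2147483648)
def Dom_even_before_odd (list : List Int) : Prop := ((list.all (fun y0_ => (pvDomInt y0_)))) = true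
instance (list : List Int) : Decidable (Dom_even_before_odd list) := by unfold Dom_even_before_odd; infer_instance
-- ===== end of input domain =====

-- B replaces A's recursive head-split (quadratic concatenations) by one forward pass
-- into two accumulators, returning evens ++ reversed odds (faster, O(n)).


-- ===== PORT A =====
-- A: if len ≤ 1 return list; even head is prepended to, odd head appended after, the recursion on the tail.
def even_before_odd (list : List Int) : List Int :=
  match list with
  | [] => []
  | [x] => [x]
  | x :: rest =>
    if x % 2 == 0 then [x] ++ even_before_odd rest
    else even_before_odd rest ++ [x]

-- ===== PORT B =====
-- B: one fold collecting (evens, odds) in encounter order, then evens ++ odds.reverse.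
def even_before_odd_alt (list : List Int) : List Int :=
  let p := list.foldl
    (fun (acc : List Int × List Int) x =>
      if x % 2 == 0 then (acc.1 ++ [x], acc.2) else (acc.1, acc.2 ++ [x]))
    ([], [])
  p.1 ++ p.2.reverse

-- ===== PRECONDITION & SPEC =====
def Spec_even_before_odd (list : List Int) (out : List Int) : Prop := out = even_before_odd_alt list
instance (list : List Int) (out : List Int) : Decidable (Spec_even_before_odd list out) := by unfold Spec_even_before_odd; infer_instance

-- ===== CLAIM (what is proved, stated in full; the proofs are below) =====
def Claim_equal_even_before_odd : Prop := ∀ (list : List Int), Dom_even_before_odd list → Spec_even_before_odd list (even_before_odd list)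

-- ===== LEMMAS AND PROOFS =====

lemma even_before_odd_char (l : List Int) :
    even_before_odd l =
      l.filter (fun x => x % 2 == 0) ++ (l.filter (fun x => !(x % 2 == 0))).reverse := by
  induction l with
  | nil => rfl
  | cons x rest ih =>
    cases rest with
    | nil => by_cases h : x % 2 == 0 <;> simp [even_before_odd, h]
    | cons y t =>
      by_cases h : x % 2 == 0 <;>
        simp [even_before_odd, h, ih]

lemma even_before_odd_alt_fold (l : List Int) (e o : List Int) :
    l.foldl
      (fun (acc : List Int × List Int) x =>
        if x % 2 == 0 then (acc.1 ++ [x], acc.2) else (acc.1, acc.2 ++ [x]))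
      (e, o)
    = (e ++ l.filter (fun x => x % 2 == 0), o ++ l.filter (fun x => !(x % 2 == 0))) := by
  induction l generalizing e o with
  | nil => simp
  | cons x rest ih =>
    rw [List.foldl_cons]
    by_cases h : x % 2 == 0
    · rw [if_pos h, ih, List.filter_cons, List.filter_cons]
      simp [h]
    · rw [if_neg h, ih, List.filter_cons, List.filter_cons]
      simp [h]

lemma even_before_odd_alt_char (l : List Int) :
    even_before_odd_alt l =
      l.filter (fun x => x % 2 == 0) ++ (l.filter (fun x => !(x % 2 == 0))).reverse := by
  rw [even_before_odd_alt, even_before_odd_alt_fold]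
  simp

-- ===== VERDICT (by name: the statement is the Claim_ definition above) =====
theorem even_before_odd_spec : Claim_equal_even_before_odd := by
  intro l _
  unfold Spec_even_before_odd
  rw [even_before_odd_char, even_before_odd_alt_char]
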